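-- pv_equiv track=rewrite | github.com/Nsfr750/PRJ-1 | script/utils/version.py | is_compatible_version
-- ===== SOURCE A (Python) =====
-- from typing import Tuple, Union, Optional, Dict, List
--
-- def is_compatible_version(version: Union[str, Tuple[int, int, int]],
--                          required_version: Union[str, Tuple[int, int, int]]) -> bool:
--     """
--     Check if a version is compatible with a required version.
--     Uses semantic versioning compatibility rules.
--
--     Args:
--         version: Version to check
--         required_version: Required version
--
--     Returns:
--         True if compatible, False otherwise
--     """
--     try:
--         if isinstance(required_version, str):
--             req_tuple = tuple(int(part) for part in required_version.split('.')[:3] if part.isdigit())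
--         else:
--             req_tuple = required_version[:3]
--
--         if isinstance(version, str):
--             ver_tuple = tuple(int(part) for part in version.split('.')[:3] if part.isdigit())
--         else:
--             ver_tuple = version[:3]
--
--         # Major version must match exactly
--         if ver_tuple[0] != req_tuple[0]:
--             return False
--
--         # Minor version must be >= required
--         if ver_tuple[1] < req_tuple[1]:
--             return False
--
--         # Patch version can be anything if minor matches
--         if ver_tuple[1] == req_tuple[1] and ver_tuple[2] < req_tuple[2]:
--             return False
--
--         return True
--
--     except (ValueError, IndexError, TypeError):
--         return False
-- ===== SOURCE B (Python) =====
-- def _parts(v):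
--     """First three '.'-separated fields that are purely digits, as ints."""
--     if isinstance(v, str):
--         return [int(p) for p in v.split('.')[:3] if p.isdigit()]
--     return list(v[:3])
--
--
-- def _accept(vs, rs, mode):
--     """Recursive lockstep descent over the two component lists.
--     mode 0 (major): heads must be equal, then recurse.
--     mode 1 (minor): strict order decides; a tie defers to the patch.
--     mode 2 (patch): head comparison >= decides.
--     Running out of components while still undecided means incompatible."""
--     if not vs or not rs:
--         return False
--     v, r = vs[0], rs[0]
--     if mode == 0:
--         return v == r and _accept(vs[1:], rs[1:], 1)
--     if mode == 1:
--         if v != r: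
--             return v > r
--         return _accept(vs[1:], rs[1:], 2)
--     return v >= r
--
--
-- def is_compatible_version(version, required_version):
--     """Semantic-version compatibility as a recursive descent with a
--     per-position comparison mode, no indexing and no exception handling."""
--     return _accept(_parts(version), _parts(required_version), 0)
-- ===== Notes on version B (the rewrite author's own statement) =====
-- stated objective: alternative
-- what changed: B replaces A's try/except-guarded branch ladder over indexed tuple accesses by a recursive lockstep descent over the two component lists with a per-position comparison mode (equal / strict-or-defer / at-least), where running out of components while undecided yields False instead of a caught IndexError.
import Mathlib
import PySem

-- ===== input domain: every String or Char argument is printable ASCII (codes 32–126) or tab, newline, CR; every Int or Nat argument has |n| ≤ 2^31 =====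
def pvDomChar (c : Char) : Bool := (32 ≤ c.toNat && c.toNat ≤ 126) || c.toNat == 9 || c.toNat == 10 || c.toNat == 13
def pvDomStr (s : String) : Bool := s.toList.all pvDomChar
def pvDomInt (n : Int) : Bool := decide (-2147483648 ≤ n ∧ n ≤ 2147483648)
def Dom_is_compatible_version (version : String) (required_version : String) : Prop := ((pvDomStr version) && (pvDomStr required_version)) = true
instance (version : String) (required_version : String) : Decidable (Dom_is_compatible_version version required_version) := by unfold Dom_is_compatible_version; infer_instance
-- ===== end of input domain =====

-- B replaces A's try/except-guarded branch ladder over indexed accesses by a recursive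
-- lockstep descent over the component lists with a comparison mode (objective: alternative).


-- ===== PORT A =====
-- int(part) for a part that already passed part.isdigit() (characters '0'–'9' only):
-- hand port of int(), exact on such strings (int() never raises there).
def pvIntOfDigits (p : List Char) : Int :=
  p.foldl (fun a c => a * 10 + ((c.toNat : Int) - 48)) 0

-- tuple(int(part) for part in s.split('.')[:3] if part.isdigit())
def pvTupleOf (s : String) : List Int :=
  (((PySem.Chars.splitOn s.toList ['.']).take 3).filter PySem.Chars.strIsdigit).map pvIntOfDigits

def is_compatible_version (version : String) (required_version : String) : Bool :=
  let req_tuple := pvTupleOf required_version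
  let ver_tuple := pvTupleOf version
  -- the try/except catches exactly the IndexErrors of the [0]/[1]/[2] accesses (pyGet? = none)
  match PySem.List.pyGet? ver_tuple 0, PySem.List.pyGet? req_tuple 0 with
  | some v0, some r0 =>
    if v0 ≠ r0 then false
    else
      match PySem.List.pyGet? ver_tuple 1, PySem.List.pyGet? req_tuple 1 with
      | some v1, some r1 =>
        if v1 < r1 then false
        else if v1 = r1 then
          match PySem.List.pyGet? ver_tuple 2, PySem.List.pyGet? req_tuple 2 with
          | some v2, some r2 => !decide (v2 < r2)
          | _, _ => false
        else true
      | _, _ => false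
  | _, _ => false

-- ===== PORT B =====
-- [int(p) for p in v.split('.')[:3] if p.isdigit()]  (B parses exactly as A does)
def pvNumericParts (v : String) : List Int :=
  (((PySem.Chars.splitOn v.toList ['.']).take 3).filter PySem.Chars.strIsdigit).map pvIntOfDigits

-- _accept: recursive lockstep descent with a per-position comparison mode
def pvAccept : List Int → List Int → Nat → Bool
  | [], _, _ => false
  | _, [], _ => false
  | v :: vs, r :: rs, 0 => v == r && pvAccept vs rs 1
  | v :: vs, r :: rs, 1 => if v ≠ r then decide (v > r) else pvAccept vs rs 2
  | v :: _, r :: _, _ => decide (v ≥ r)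

def is_compatible_version_alt (version : String) (required_version : String) : Bool :=
  pvAccept (pvNumericParts version) (pvNumericParts required_version) 0

-- ===== PRECONDITION & SPEC =====
def Spec_is_compatible_version (version : String) (required_version : String) (out : Bool) : Prop := out = is_compatible_version_alt version required_version
instance (version : String) (required_version : String) (out : Bool) : Decidable (Spec_is_compatible_version version required_version out) := by unfold Spec_is_compatible_version; infer_instance

-- ===== CLAIM (what is proved, stated in full; the proofs are below) =====
def Claim_equal_is_compatible_version : Prop := ∀ (version : String) (required_version : String), Dom_is_compatible_version version required_version → Spec_is_compatible_version version required_version (is_compatible_version version required_version)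

-- ===== LEMMAS AND PROOFS =====

-- A's indexed branch ladder equals B's recursive descent on any two Int lists.
lemma pvCmp_eq (ver req : List Int) :
    (match PySem.List.pyGet? ver 0, PySem.List.pyGet? req 0 with
     | some v0, some r0 =>
       if v0 ≠ r0 then false
       else
         match PySem.List.pyGet? ver 1, PySem.List.pyGet? req 1 with
         | some v1, some r1 =>
           if v1 < r1 then false
           else if v1 = r1 then
             match PySem.List.pyGet? ver 2, PySem.List.pyGet? req 2 with
             | some v2, some r2 => !decide (v2 < r2)
             | _, _ => false
           else true
         | _, _ => false
     | _, _ => false)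
    = pvAccept ver req 0 := by
  rcases ver with _ | ⟨a, _ | ⟨b, _ | ⟨c, vt⟩⟩⟩ <;>
    rcases req with _ | ⟨x, _ | ⟨y, _ | ⟨z, rt⟩⟩⟩ <;>
    simp only [show (0 : Int) = ((0 : Nat) : Int) from rfl,
      show (1 : Int) = ((1 : Nat) : Int) from rfl,
      show (2 : Int) = ((2 : Nat) : Int) from rfl,
      PySem.List.pyGet?_natCast, List.getElem?_cons_zero, List.getElem?_cons_succ,
      List.getElem?_nil, pvAccept] <;>
    first
      | rfl
      | (split_ifs <;> simp_all <;> omega)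
      | (split_ifs <;> simp_all [← decide_not, not_le] <;> omega)

-- ===== VERDICT (by name: the statement is the Claim_ definition above) =====
theorem is_compatible_version_spec : Claim_equal_is_compatible_version := by
  intro version required_version _
  show is_compatible_version version required_version = is_compatible_version_alt version required_version
  unfold is_compatible_version is_compatible_version_alt pvNumericParts
  exact pvCmp_eq _ _
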